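-- pv_equiv track=rewrite | github.com/joshanashakya/dissertation | workspace/dataset/java-python/GeeksForGeeks/1807/A/2.py | isNumBalanced
-- ===== SOURCE A (Python) =====
-- def isNumBalanced(N):
--
--     st = str(N)
--     isBalanced = True
--
--     # Frequency array to store the frequencies
--     # of all the digits of the number
--     freq = [0] * 10
--     n = len(st)
--
--     for i in range(0, n):
--
--         # store the frequency of the
--         # current digit
--         freq[int(st[i])] += 1
--
--     for i in range(0, 9):
--
--         # if freq[i] is not equal to
--         # freq[i + 1] at any index 'i'
--         # then set isBalanced to false
--         if freq[i] != freq[i + 1]: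
--             isBalanced = False
--
--     # Return true if the string
--     # is balanced
--     if isBalanced:
--         return True
--     else:
--         return False
-- ===== SOURCE B (Python) =====
-- def isNumBalanced(N):
--     digits = sorted(int(c) for c in str(N))
--     k = len(digits) // 10
--     return digits == [d for d in range(10) for _ in range(k)]
-- ===== Notes on version B (the rewrite author's own statement) =====
-- stated objective: alternative
-- what changed: B replaces A's 10-slot frequency table plus adjacent-count scan by sorting the digit list once and comparing it to the canonical fully-balanced sequence [0]*k+[1]*k+...+[9]*k with k = len//10.
import Mathlib
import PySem

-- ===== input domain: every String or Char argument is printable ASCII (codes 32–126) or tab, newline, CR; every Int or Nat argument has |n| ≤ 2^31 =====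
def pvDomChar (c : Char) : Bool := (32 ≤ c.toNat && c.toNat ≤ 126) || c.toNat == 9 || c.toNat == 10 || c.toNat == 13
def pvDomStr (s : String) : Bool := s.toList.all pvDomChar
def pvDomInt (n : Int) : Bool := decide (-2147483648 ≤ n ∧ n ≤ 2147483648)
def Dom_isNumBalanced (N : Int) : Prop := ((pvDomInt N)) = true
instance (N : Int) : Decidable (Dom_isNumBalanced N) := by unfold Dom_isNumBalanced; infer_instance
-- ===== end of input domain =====

-- B sorts the digit list once and compares it with the canonical fully-balanced sequence,
-- instead of A's frequency table plus adjacent-count scan (objective: alternative decomposition).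

-- ===== PORT A =====
-- int(st[i]) on a single character; `.getD 0` is only the Option default for the
-- ValueError case (non-digit char), which Pre_ (0 ≤ N) excludes.
def pvConv (c : Char) : Int := (PySem.Int.ofChars? [c]).getD 0

-- freq[int(st[i])] += 1 ; the index is a digit 0..9 under Pre_, hence `.toNat` is exact there.
def pvBump (freq : List Int) (c : Char) : List Int :=
  freq.set (pvConv c).toNat (freq.getD (pvConv c).toNat 0 + 1)

def isNumBalanced (N : Int) : Bool :=
  let st := PySem.Int.toChars N
  let freq := st.foldl pvBump (List.replicate 10 (0 : Int))
  let isBalanced := (PySem.List.pyRange 0 9 1).foldl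
      (fun b i => if freq.getD i.toNat 0 ≠ freq.getD (i.toNat + 1) 0 then false else b) true
  if isBalanced then true else false

-- ===== PORT B =====
-- digits = sorted(int(c) for c in str(N)); k = len(digits) // 10  (len ≥ 0, so Nat `/` is Python `//`)
-- return digits == [d for d in range(10) for _ in range(k)]
def isNumBalanced_alt (N : Int) : Bool :=
  let digits := PySem.List.sorted ((PySem.Int.toChars N).map pvConv) (fun x => x) false
  let k := digits.length / 10
  digits == (PySem.List.pyRange 0 10 1).flatMap (fun d => List.replicate k d)

-- ===== PRECONDITION & SPEC =====
-- Pre_ excludes negative N, on which A raises ValueError at int('-') (B raises there too).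
def Pre_isNumBalanced (N : Int) : Prop := 0 ≤ N
instance (N : Int) : Decidable (Pre_isNumBalanced N) := by unfold Pre_isNumBalanced; infer_instance

def pvWitness_isNumBalanced : Int := 1234567890

def Spec_isNumBalanced (N : Int) (out : Bool) : Prop := out = isNumBalanced_alt N
instance (N : Int) (out : Bool) : Decidable (Spec_isNumBalanced N out) := by unfold Spec_isNumBalanced; infer_instance

-- ===== CLAIM (what is proved, stated in full; the proofs are below) =====
def Claim_equal_isNumBalanced : Prop := ∀ (N : Int), Dom_isNumBalanced N → Pre_isNumBalanced N → Spec_isNumBalanced N (isNumBalanced N)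

-- ===== LEMMAS AND PROOFS =====

-- every character produced by Nat.toDigits 10 is a decimal digit char
theorem toDigitsCore_digit (fuel n : Nat) (ds : List Char) (c : Char)
    (hc : c ∈ Nat.toDigitsCore 10 fuel n ds) :
    c ∈ ds ∨ ∃ j : Nat, j < 10 ∧ c = Nat.digitChar j := by
  induction fuel generalizing n ds with
  | zero => exact Or.inl hc
  | succ f ih =>
    simp only [Nat.toDigitsCore] at hc
    split at hc
    next hlt =>
      rw [List.mem_cons] at hc
      rcases hc with h | h
      · exact Or.inr ⟨n % 10, Nat.mod_lt _ (by norm_num), h⟩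
      · exact Or.inl h
    next =>
      rcases ih (n / 10) _ hc with h | h
      · rw [List.mem_cons] at h
        rcases h with h | h
        · exact Or.inr ⟨n % 10, Nat.mod_lt _ (by norm_num), h⟩
        · exact Or.inl h
      · exact Or.inr h

theorem conv_digitChar (j : Nat) (hj : j < 10) :
    PySem.Int.ofChars? [Nat.digitChar j] = some (j : Int) := by
  interval_cases j <;> decide

theorem toChars_digits (N : Int) (hN : 0 ≤ N) (c : Char) (hc : c ∈ PySem.Int.toChars N) :
    ∃ j : Nat, j < 10 ∧ pvConv c = (j : Int) ∧ 0 ≤ pvConv c ∧ pvConv c < 10 := by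
  have h : c ∈ Nat.toDigits 10 N.toNat := by
    simpa [PySem.Int.toChars, not_lt.mpr hN, Int.not_lt.mpr hN] using hc
  rcases toDigitsCore_digit _ _ _ _ h with h' | ⟨j, hj, rfl⟩
  · simp at h'
  · refine ⟨j, hj, ?_, ?_, ?_⟩ <;> simp [pvConv, conv_digitChar j hj] <;> omega

-- the frequency-table fold, characterised by counts
theorem bump_fold (ds : List Int) (hds : ∀ d ∈ ds, 0 ≤ d ∧ d < 10) :
    ∀ (freq : List Int), freq.length = 10 →
      (∀ j : Nat, j < 10 →
        (ds.foldl (fun f d => f.set d.toNat (f.getD d.toNat 0 + 1)) freq).getD j 0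
          = freq.getD j 0 + ds.count ((j : Nat) : Int)) := by
  induction ds with
  | nil => intro freq _ j _; simp
  | cons a t ih =>
    intro freq hlen j hj
    have ha := hds a (by simp)
    have hrec := ih (fun d hd => hds d (by simp [hd]))
        (freq.set a.toNat (freq.getD a.toNat 0 + 1)) (by simp [hlen]) j hj
    simp only [List.foldl_cons] at *
    rw [hrec]
    have hset : (freq.set a.toNat (freq.getD a.toNat 0 + 1)).getD j 0
        = if j = a.toNat then freq.getD a.toNat 0 + 1 else freq.getD j 0 := by
      by_cases h : j = a.toNat
      · subst h
        simp [List.getD, hlen, hj]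
      · simp only [List.getD, List.getElem?_set]
        rw [if_neg (fun h' => h h'.symm), if_neg h]
    rw [hset, List.count_cons]
    by_cases h : j = a.toNat
    · have : a = ((j : Nat) : Int) := by omega
      simp [this]
      omega
    · have : ¬ (a = ((j : Nat) : Int)) := by omega
      simp [this, h]

-- the adjacent-check fold is an `all`
theorem foldl_if_false {α : Type} (p : α → Prop) [DecidablePred p] (l : List α) (b : Bool) :
    l.foldl (fun b i => if p i then false else b) b = (b && l.all (fun i => !(decide (p i)))) := by
  induction l generalizing b with
  | nil => simp
  | cons a t ih =>
    simp only [List.foldl_cons, List.all_cons, ih]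
    by_cases h : p a <;> simp [h]

-- the canonical balanced sequence is sorted
theorem flatMap_replicate_pairwise (k : Nat) (ns : List Int) (h : ns.Pairwise (· ≤ ·)) :
    (ns.flatMap (fun d => List.replicate k d)).Pairwise (· ≤ ·) := by
  induction ns with
  | nil => simp
  | cons a t ih =>
    rw [List.flatMap_cons, List.pairwise_append]
    rw [List.pairwise_cons] at h
    refine ⟨List.pairwise_replicate.mpr (Or.inr le_rfl), ih h.2, ?_⟩
    intro x hx y hy
    rw [List.eq_of_mem_replicate hx]
    rcases List.mem_flatMap.mp hy with ⟨e, he, hye⟩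
    rw [List.eq_of_mem_replicate hye]
    exact h.1 e he

-- length = sum of the ten digit counts
theorem length_eq_sum_counts (ds : List Int) (hds : ∀ d ∈ ds, 0 ≤ d ∧ d < 10) :
    ds.length = ds.count 0 + ds.count 1 + ds.count 2 + ds.count 3 + ds.count 4
      + ds.count 5 + ds.count 6 + ds.count 7 + ds.count 8 + ds.count 9 := by
  induction ds with
  | nil => simp
  | cons a t ih =>
    have ha := hds a (by simp)
    have ht := ih (fun d hd => hds d (by simp [hd]))
    simp only [List.count_cons, List.length_cons, ht]
    have : a = 0 ∨ a = 1 ∨ a = 2 ∨ a = 3 ∨ a = 4 ∨ a = 5 ∨ a = 6 ∨ a = 7 ∨ a = 8 ∨ a = 9 := by omega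
    rcases this with h | h | h | h | h | h | h | h | h | h <;> subst h <;> simp <;> omega

-- the central equivalence on an arbitrary digit list
theorem central (ds : List Int) (hds : ∀ d ∈ ds, 0 ≤ d ∧ d < 10) :
    ((ds.count 0 = ds.count 1 ∧ ds.count 1 = ds.count 2 ∧ ds.count 2 = ds.count 3 ∧
      ds.count 3 = ds.count 4 ∧ ds.count 4 = ds.count 5 ∧ ds.count 5 = ds.count 6 ∧
      ds.count 6 = ds.count 7 ∧ ds.count 7 = ds.count 8 ∧ ds.count 8 = ds.count 9) ↔
      PySem.List.sorted ds (fun x => x) false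
        = (PySem.List.pyRange 0 10 1).flatMap (fun d => List.replicate (ds.length / 10) d)) := by
  rw [show PySem.List.pyRange 0 10 1 = ([0,1,2,3,4,5,6,7,8,9] : List Int) from by decide]
  constructor
  · rintro ⟨h0, h1, h2, h3, h4, h5, h6, h7, h8⟩
    have hlen : ds.length = 10 * ds.count 0 := by
      have := length_eq_sum_counts ds hds; omega
    have hk : ds.length / 10 = ds.count 0 := by omega
    apply PySem.List.sorted_id_eq_of_perm_of_pairwise
    · rw [List.perm_iff_count]
      intro a
      by_cases h : a = 0 ∨ a = 1 ∨ a = 2 ∨ a = 3 ∨ a = 4 ∨ a = 5 ∨ a = 6 ∨ a = 7 ∨ a = 8 ∨ a = 9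
      · rcases h with h | h | h | h | h | h | h | h | h | h <;> subst h <;>
          simp [List.count_replicate, hk] <;> omega
      · push Not at h
        obtain ⟨n0, n1, n2, n3, n4, n5, n6, n7, n8, n9⟩ := h
        have hmem : a ∉ ds := by
          intro hmem
          have := hds a hmem
          omega
        rw [List.count_eq_zero.mpr hmem]
        simp [List.count_replicate]
        omega
    · exact flatMap_replicate_pairwise _ _ (by decide)
  · intro hsort
    have hperm := PySem.List.sorted_perm ds (fun x => x) false
    rw [hsort] at hperm
    have hcount := List.perm_iff_count.mp hperm
    have g0 := hcount 0; have g1 := hcount 1; have g2 := hcount 2; have g3 := hcount 3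
    have g4 := hcount 4; have g5 := hcount 5; have g6 := hcount 6; have g7 := hcount 7
    have g8 := hcount 8; have g9 := hcount 9
    simp [List.count_replicate] at g0 g1 g2 g3 g4 g5 g6 g7 g8 g9
    omega

-- evaluate port A to the count condition
theorem portA_eval (N : Int) (hds : ∀ d ∈ (PySem.Int.toChars N).map pvConv, 0 ≤ d ∧ d < 10) :
    isNumBalanced N =
    decide (((PySem.Int.toChars N).map pvConv).count 0 = ((PySem.Int.toChars N).map pvConv).count 1 ∧
      ((PySem.Int.toChars N).map pvConv).count 1 = ((PySem.Int.toChars N).map pvConv).count 2 ∧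
      ((PySem.Int.toChars N).map pvConv).count 2 = ((PySem.Int.toChars N).map pvConv).count 3 ∧
      ((PySem.Int.toChars N).map pvConv).count 3 = ((PySem.Int.toChars N).map pvConv).count 4 ∧
      ((PySem.Int.toChars N).map pvConv).count 4 = ((PySem.Int.toChars N).map pvConv).count 5 ∧
      ((PySem.Int.toChars N).map pvConv).count 5 = ((PySem.Int.toChars N).map pvConv).count 6 ∧
      ((PySem.Int.toChars N).map pvConv).count 6 = ((PySem.Int.toChars N).map pvConv).count 7 ∧
      ((PySem.Int.toChars N).map pvConv).count 7 = ((PySem.Int.toChars N).map pvConv).count 8 ∧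
      ((PySem.Int.toChars N).map pvConv).count 8 = ((PySem.Int.toChars N).map pvConv).count 9) := by
  have hfold : (PySem.Int.toChars N).foldl pvBump (List.replicate 10 (0 : Int))
      = ((PySem.Int.toChars N).map pvConv).foldl
          (fun f d => f.set d.toNat (f.getD d.toNat 0 + 1)) (List.replicate 10 (0 : Int)) := by
    rw [List.foldl_map]; rfl
  have hcnt : ∀ j : Nat, j < 10 →
      (((PySem.Int.toChars N).map pvConv).foldl
          (fun f d => f.set d.toNat (f.getD d.toNat 0 + 1)) (List.replicate 10 (0 : Int))).getD j 0
        = (((PySem.Int.toChars N).map pvConv).count ((j : Nat) : Int) : Int) := by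
    intro j hj
    rw [bump_fold _ hds _ (by simp) j hj, List.getD_replicate _ hj]
    simp
  simp only [isNumBalanced, hfold]
  rw [show PySem.List.pyRange 0 9 1 = [0, 1, 2, 3, 4, 5, 6, 7, 8] from by decide]
  rw [foldl_if_false]
  simp only [List.all_cons, List.all_nil, Bool.and_true, Bool.true_and]
  have e0 := hcnt 0 (by norm_num); have e1 := hcnt 1 (by norm_num); have e2 := hcnt 2 (by norm_num)
  have e3 := hcnt 3 (by norm_num); have e4 := hcnt 4 (by norm_num); have e5 := hcnt 5 (by norm_num)
  have e6 := hcnt 6 (by norm_num); have e7 := hcnt 7 (by norm_num); have e8 := hcnt 8 (by norm_num)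
  have e9 := hcnt 9 (by norm_num)
  simp only [show Int.toNat 0 = 0 from rfl, show Int.toNat 1 = 1 from rfl,
    show Int.toNat 2 = 2 from rfl, show Int.toNat 3 = 3 from rfl, show Int.toNat 4 = 4 from rfl,
    show Int.toNat 5 = 5 from rfl, show Int.toNat 6 = 6 from rfl, show Int.toNat 7 = 7 from rfl,
    show Int.toNat 8 = 8 from rfl, show (0:Nat) + 1 = 1 from rfl, show (1:Nat) + 1 = 2 from rfl,
    show (2:Nat) + 1 = 3 from rfl, show (3:Nat) + 1 = 4 from rfl, show (4:Nat) + 1 = 5 from rfl,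
    show (5:Nat) + 1 = 6 from rfl, show (6:Nat) + 1 = 7 from rfl, show (7:Nat) + 1 = 8 from rfl,
    show (8:Nat) + 1 = 9 from rfl]
  simp only [Nat.cast_ofNat, Nat.cast_one, Nat.cast_zero] at e0 e1 e2 e3 e4 e5 e6 e7 e8 e9
  rw [e0, e1, e2, e3, e4, e5, e6, e7, e8, e9]
  simp only [ne_eq, Nat.cast_inj, decide_not, Bool.not_not, Bool.if_false_right, Bool.decide_eq_true, Bool.and_true, ← Bool.decide_and]

theorem portB_eval (N : Int) :
    isNumBalanced_alt N = decide (PySem.List.sorted ((PySem.Int.toChars N).map pvConv) (fun x => x) false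
        = (PySem.List.pyRange 0 10 1).flatMap
            (fun d => List.replicate (((PySem.Int.toChars N).map pvConv).length / 10) d)) := by
  simp [isNumBalanced_alt, PySem.List.length_sorted, Bool.beq_eq_decide_eq]

-- ===== VERDICT (by name: the statement is the Claim_ definition above) =====
theorem isNumBalanced_spec : Claim_equal_isNumBalanced := by
  intro N _ hpre
  unfold Spec_isNumBalanced
  have hds : ∀ d ∈ (PySem.Int.toChars N).map pvConv, 0 ≤ d ∧ d < 10 := by
    intro d hd
    rcases List.mem_map.mp hd with ⟨c, hc, rfl⟩
    rcases toChars_digits N hpre c hc with ⟨j, _, _, h1, h2⟩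
    exact ⟨h1, h2⟩
  rw [portA_eval N hds, portB_eval N]
  exact decide_eq_decide.mpr (central _ hds)
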